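-- pv_equiv track=rewrite | github.com/AileenKoneko/K-language-model | tests/test_rosa.py | _copy_prior_reference
-- ===== SOURCE A (Python) =====
-- def _copy_prior_reference(x: list[int]) -> list[int]:
--     out = [-1] * len(x)
--     seen_next: dict[int, int] = {}
--     for i, token in enumerate(x):
--         out[i] = seen_next.get(token, -1)
--         if i + 1 < len(x):
--             seen_next[token] = x[i + 1]
--     return out
-- ===== SOURCE B (Python) =====
-- def _copy_prior_reference(x: list[int]) -> list[int]:
--     out = []
--     for j in range(len(x)):
--         val = -1
--         for p in range(j - 1, -1, -1):
--             if x[p] == x[j]: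
--                 val = x[p + 1]
--                 break
--         out.append(val)
--     return out
-- ===== Notes on version B (the rewrite author's own statement) =====
-- stated objective: alternative
-- what changed: Replaces the streaming last-next dict and preallocated output with a direct per-index backward scan for the previous occurrence, building the output by appending; no dict, no in-place mutation.
import Mathlib
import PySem

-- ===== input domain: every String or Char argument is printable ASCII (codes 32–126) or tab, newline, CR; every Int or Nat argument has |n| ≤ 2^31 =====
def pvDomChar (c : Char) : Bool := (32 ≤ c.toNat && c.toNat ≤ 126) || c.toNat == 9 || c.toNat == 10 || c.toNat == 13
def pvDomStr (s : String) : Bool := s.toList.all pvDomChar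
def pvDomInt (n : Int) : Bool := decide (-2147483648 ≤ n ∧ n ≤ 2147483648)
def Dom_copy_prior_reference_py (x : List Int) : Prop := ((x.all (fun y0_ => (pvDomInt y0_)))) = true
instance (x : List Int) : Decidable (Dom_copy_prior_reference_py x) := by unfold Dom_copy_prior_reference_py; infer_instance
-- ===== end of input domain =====

-- B replaces A's streaming last-next dict with a direct per-index backward scan (alternative decomposition, same return value).

-- ===== PORT A =====
-- literal transliteration of A: preallocated out of -1s, a dict 'seen_next', one pass over enumerate(x)
def copy_prior_reference_py (x : List Int) : List Int :=
  (((PySem.List.enumerate x 0).foldl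
      (fun (st : List Int × PySem.Dict Int Int) (p : Int × Int) =>
        (PySem.List.pySetD st.1 p.1 (st.2.getD p.2 (-1)),
         if p.1 + 1 < (x.length : Int) then st.2.insert p.2 (PySem.List.pyGetD x (p.1 + 1) 0) else st.2))
      (List.replicate x.length (-1), PySem.Dict.empty))).1

-- ===== PORT B =====
-- helper for B's inner loop: for p in range(j-1, -1, -1): if x[p] == x[j]: val = x[p+1]; break
def priorVal (x : List Int) (j : Int) : Int :=
  match (PySem.List.pyRange (j - 1) (-1) (-1)).find?
          (fun p => PySem.List.pyGetD x p 0 == PySem.List.pyGetD x j 0) with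
  | some p => PySem.List.pyGetD x (p + 1) 0
  | none => -1

def copy_prior_reference_py_alt (x : List Int) : List Int :=
  (PySem.List.pyRange 0 (x.length : Int) 1).foldl (fun out j => out ++ [priorVal x j]) []

-- ===== PRECONDITION & SPEC =====
def Spec_copy_prior_reference_py (x : List Int) (out : List Int) : Prop := out = copy_prior_reference_py_alt x
instance (x : List Int) (out : List Int) : Decidable (Spec_copy_prior_reference_py x out) := by unfold Spec_copy_prior_reference_py; infer_instance

-- ===== CLAIM (what is proved, stated in full; the proofs are below) =====
def Claim_equal_copy_prior_reference_py : Prop := ∀ (x : List Int), Dom_copy_prior_reference_py x → Spec_copy_prior_reference_py x (copy_prior_reference_py x)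

-- ===== LEMMAS AND PROOFS =====

-- value the dict holds for token t after processing the first k elements (and the common spec value)
def seenVal (x : List Int) (k : Nat) (t : Int) : Int :=
  match ((List.range k).filter (fun p => x.getD p 0 == t)).getLast? with
  | some p => x.getD (p + 1) 0
  | none => -1

-- A's fold, re-indexed over List.range
def stepA (x : List Int) (st : List Int × PySem.Dict Int Int) (j : Nat) : List Int × PySem.Dict Int Int :=
  (PySem.List.pySetD st.1 (j : Int) (st.2.getD (PySem.List.pyGetD x (j : Int) 0) (-1)),
   if ((j : Int) + 1 : Int) < (x.length : Int) then
     st.2.insert (PySem.List.pyGetD x (j : Int) 0) (PySem.List.pyGetD x ((j : Int) + 1) 0)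
   else st.2)

lemma portA_eq_range_fold (x : List Int) :
    copy_prior_reference_py x =
      ((List.range x.length).foldl (stepA x)
        (List.replicate x.length (-1), PySem.Dict.empty)).1 := by
  unfold copy_prior_reference_py
  rw [PySem.List.enumerate_eq_map_pyRange (d := 0)]
  simp only [PySem.List.len_eq]
  rw [List.foldl_map, PySem.List.pyRange_zero_natCast, List.foldl_map]
  rfl

lemma find?_reverse_eq_getLast?_filter {α : Type} (p : α → Bool) (l : List α) :
    l.reverse.find? p = (l.filter p).getLast? := by
  induction l with
  | nil => rfl
  | cons a l ih =>
    simp only [List.reverse_cons, List.find?_append, List.filter_cons]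
    cases h : (l.filter p).getLast? with
    | some q =>
      have hne : l.filter p ≠ [] := by
        intro h0; rw [h0] at h; simp at h
      obtain ⟨b, m, hbm⟩ : ∃ b m, l.filter p = b :: m := by
        cases hl : l.filter p with
        | nil => exact absurd hl hne
        | cons b m => exact ⟨b, m, rfl⟩
      rw [ih, h]
      by_cases hp : p a
      · obtain ⟨q', hq'⟩ := Option.isSome_iff_exists.mp (by simp : (b :: m).getLast?.isSome)
        simp [hp, hbm, ← h, List.getLast?_cons_cons, hq']
      · simp [hp, h]
    | none =>
      have h0 : l.filter p = [] := by
        cases hl : l.filter p with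
        | nil => rfl
        | cons b m => rw [hl] at h; simp at h
      rw [ih, h]
      by_cases hp : p a
      · simp [hp, h0]
      · simp [hp, h0]

lemma priorVal_eq_seenVal (x : List Int) (j : Nat) :
    priorVal x (j : Int) = seenVal x j (x.getD j 0) := by
  unfold priorVal seenVal
  have hr : PySem.List.pyRange ((j : Int) - 1) (-1) (-1)
      = ((List.range j).map (Nat.cast : Nat → Int)).reverse := by
    rw [PySem.List.pyRange_neg_one_eq_reverse]
    congr 1
    rw [PySem.List.pyRange_one]
    simp
  rw [hr, ← List.map_reverse, List.find?_map]
  have hp : ((fun p => PySem.List.pyGetD x p 0 == PySem.List.pyGetD x (j : Int) 0)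
        ∘ (Nat.cast : Nat → Int))
      = (fun p : Nat => x.getD p 0 == x.getD j 0) := by
    funext p
    simp [Function.comp, PySem.List.pyGetD_natCast]
  rw [hp, find?_reverse_eq_getLast?_filter]
  cases h : ((List.range j).filter (fun p => x.getD p 0 == x.getD j 0)).getLast? with
  | some p =>
    simp only [Option.map_some]
    have : ((p : Int) + 1) = ((p + 1 : Nat) : Int) := by push_cast; ring
    rw [this, PySem.List.pyGetD_natCast]
  | none => simp

lemma portB_eq_map (x : List Int) :
    copy_prior_reference_py_alt x =
      (List.range x.length).map (fun j => seenVal x j (x.getD j 0)) := by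
  unfold copy_prior_reference_py_alt
  rw [PySem.List.foldl_append_singleton_eq_map, PySem.List.pyRange_zero_natCast, List.map_map]
  exact List.map_congr_left (fun j _ => priorVal_eq_seenVal x j)

lemma seenVal_succ (x : List Int) (k : Nat) (t : Int) :
    seenVal x (k + 1) t =
      if t = x.getD k 0 then x.getD (k + 1) 0 else seenVal x k t := by
  unfold seenVal
  rw [List.range_succ, List.filter_append]
  by_cases h : t = x.getD k 0
  · have hbeq : (x.getD k 0 == t) = true := beq_iff_eq.mpr h.symm
    have hf : List.filter (fun p => x.getD p 0 == t) [k] = [k] := by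
      simp only [List.filter_cons, List.filter_nil, hbeq]; simp
    rw [hf, List.getLast?_concat, if_pos h]
  · have hbeq : (x.getD k 0 == t) = false := by
      simp only [beq_eq_false_iff_ne, ne_eq]
      exact fun hh => h hh.symm
    have hf : List.filter (fun p => x.getD p 0 == t) [k] = [] := by
      simp only [List.filter_cons, List.filter_nil, hbeq]; simp
    rw [hf, List.append_nil, if_neg h]

lemma set_map_range {n k : Nat} (hk : k < n) (f : Nat → Int) (v : Int) :
    ((List.range n).map f).set k v
      = (List.range n).map (fun j => if j = k then v else f j) := by
  apply List.ext_getElem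
  · simp
  · intro i h1 h2
    simp only [List.getElem_set, List.getElem_map, List.getElem_range]
    by_cases hik : i = k
    · simp [hik]
    · simp [hik, Ne.symm hik]

lemma A_invariant (x : List Int) (k : Nat) (hk : k ≤ x.length) :
    ((List.range k).foldl (stepA x) (List.replicate x.length (-1), PySem.Dict.empty)).1
        = (List.range x.length).map (fun j => if j < k then seenVal x j (x.getD j 0) else -1)
    ∧ (k < x.length → ∀ t,
        ((List.range k).foldl (stepA x) (List.replicate x.length (-1), PySem.Dict.empty)).2.getD t (-1)
          = seenVal x k t) := by
  induction k with
  | zero =>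
    constructor
    · simp
    · intro _ t
      simp [seenVal, PySem.Dict.getD_empty]
  | succ k ih =>
    have hk' : k ≤ x.length := Nat.le_of_succ_le hk
    have hklt : k < x.length := Nat.lt_of_succ_le hk
    obtain ⟨ih1, ih2⟩ := ih hk'
    rw [List.range_succ, List.foldl_append, List.foldl_cons, List.foldl_nil]
    set st := (List.range k).foldl (stepA x) (List.replicate x.length (-1), PySem.Dict.empty) with hst
    constructor
    · show (stepA x st k).1 = _
      unfold stepA
      simp only [PySem.List.pySetD_natCast]
      rw [ih1, PySem.List.pyGetD_natCast, ih2 hklt, set_map_range hklt]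
      apply List.map_congr_left
      intro j hj
      by_cases hjk : j = k
      · simp [hjk]
      · have : (j < k + 1) ↔ (j < k) := by omega
        simp [hjk, this]
    · intro hk1 t
      show (stepA x st k).2.getD t (-1) = _
      unfold stepA
      have hguard : ((k : Int) + 1 : Int) < (x.length : Int) := by exact_mod_cast hk1
      simp only [hguard, if_pos]
      rw [PySem.Dict.getD_insert, PySem.List.pyGetD_natCast, seenVal_succ]
      by_cases hteq : t = x.getD k 0
      · rw [if_pos hteq, if_pos hteq]
        have hcast : ((k : Int) + 1) = ((k + 1 : Nat) : Int) := by push_cast; ring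
        rw [hcast, PySem.List.pyGetD_natCast]
      · rw [if_neg hteq, if_neg hteq, ih2 hklt]

-- ===== VERDICT (by name: the statement is the Claim_ definition above) =====
theorem copy_prior_reference_py_spec : Claim_equal_copy_prior_reference_py := by
  intro x _
  unfold Spec_copy_prior_reference_py
  rw [portA_eq_range_fold, portB_eq_map, (A_invariant x x.length le_rfl).1]
  apply List.map_congr_left
  intro j hj
  rw [List.mem_range] at hj
  simp [hj]
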